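-- pv_equiv track=rewrite | github.com/MrBrantCode/unitest_baseline | mut_generate/mist_train_taco/taco_11098/solution.py | count_group_composition_variants
-- ===== SOURCE A (Python) =====
-- def count_group_composition_variants(n):
--     def c(n, k):
--         ans = 1
--         for i in range(k):
--             ans *= n - i
--         for i in range(k):
--             ans //= i + 1
--         return ans
--
--     return c(n, 5) + c(n, 6) + c(n, 7)
-- ===== SOURCE B (Python) =====
-- def count_group_composition_variants(n):
--     # One incremental pass: maintain a single running binomial b = C(n, k)
--     # via the multiplicative recurrence (exact integer division at each step),
--     # accumulating it for k = 5, 6, 7.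
--     total = 0
--     b = 1
--     for k in range(1, 8):
--         b = b * (n - k + 1) // k
--         if k >= 5:
--             total += b
--     return total
-- ===== Notes on version B (the rewrite author's own statement) =====
-- stated objective: alternative
-- what changed: Instead of computing the three binomial coefficients C(n,5), C(n,6), C(n,7) independently (each with its own product loop and division loop), B maintains a single running binomial coefficient across one pass via the multiplicative recurrence b = b*(n-k+1)//k, accumulating b at the last three steps; each floor division is exact, so the generalized-binomial values (including negative n) are reproduced.
import Mathlib
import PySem

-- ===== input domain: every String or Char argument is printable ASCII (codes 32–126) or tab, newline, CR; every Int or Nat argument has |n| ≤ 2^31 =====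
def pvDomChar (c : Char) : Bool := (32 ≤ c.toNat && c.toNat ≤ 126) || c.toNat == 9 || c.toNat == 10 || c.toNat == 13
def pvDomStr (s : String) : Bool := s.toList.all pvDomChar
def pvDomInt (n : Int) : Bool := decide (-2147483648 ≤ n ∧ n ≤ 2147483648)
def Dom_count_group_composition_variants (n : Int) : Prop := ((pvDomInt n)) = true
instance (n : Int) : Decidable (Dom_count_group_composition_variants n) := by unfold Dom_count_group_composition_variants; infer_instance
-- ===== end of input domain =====

-- B maintains one running binomial over a single pass instead of three independent
-- product/division loop pairs; equivalence is exact for all integers n.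

-- ===== PORT A =====
-- the inner helper c(n, k) of A
def pvC (n k : Int) : Int :=
  let ans := (PySem.List.pyRange 0 k 1).foldl (fun a i => a * (n - i)) 1
  (PySem.List.pyRange 0 k 1).foldl (fun a i => PySem.Int.floordiv a (i + 1)) ans

def count_group_composition_variants (n : Int) : Int :=
  pvC n 5 + pvC n 6 + pvC n 7

-- ===== PORT B =====
def count_group_composition_variants_alt (n : Int) : Int :=
  ((PySem.List.pyRange 1 8 1).foldl
    (fun (st : Int × Int) k =>
      let b := PySem.Int.floordiv (st.2 * (n - k + 1)) k
      (if 5 ≤ k then st.1 + b else st.1, b)) (0, 1)).1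

-- ===== PRECONDITION & SPEC =====
def Spec_count_group_composition_variants (n : Int) (out : Int) : Prop := out = count_group_composition_variants_alt n
instance (n : Int) (out : Int) : Decidable (Spec_count_group_composition_variants n out) := by unfold Spec_count_group_composition_variants; infer_instance

-- ===== CLAIM (what is proved, stated in full; the proofs are below) =====
def Claim_equal_count_group_composition_variants : Prop := ∀ (n : Int), Dom_count_group_composition_variants n → Spec_count_group_composition_variants n (count_group_composition_variants n)

-- ===== LEMMAS AND PROOFS =====

-- the falling factorial n (n-1) ⋯ (n-k+1) over ℤ
def pvFall (n : Int) (k : Nat) : Int := ∏ j ∈ Finset.range k, (n - j)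

-- the exact binomial value (division is exact by pvFact_dvd_fall)
def pvBinom (n : Int) (k : Nat) : Int := pvFall n k / (k.factorial : Int)

theorem pvFall_succ (n : Int) (k : Nat) : pvFall n (k + 1) = pvFall n k * (n - k) := by
  simp [pvFall, Finset.prod_range_succ]

theorem pvFact_dvd_fall (n : Int) (k : Nat) : ((k.factorial : Int)) ∣ pvFall n k := by
  have h := Ring.descPochhammer_eq_factorial_smul_choose (R := ℤ) n k
  rw [← Polynomial.eval_eq_smeval, descPochhammer_eval_eq_prod_range] at h
  exact ⟨Ring.choose n k, by simpa [pvFall, nsmul_eq_mul] using h⟩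

-- one exact floor-division step: dividing F/j! by j+1 gives F/(j+1)!
theorem pv_div_step (F : Int) (j : Nat) (h : (((j + 1).factorial : Int)) ∣ F) :
    PySem.Int.floordiv (F / (j.factorial : Int)) ((j : Int) + 1) = F / (((j + 1).factorial : Int)) := by
  obtain ⟨s, hs⟩ := h
  have hj : (j.factorial : Int) ≠ 0 := by exact_mod_cast j.factorial_ne_zero
  have hF : F = (j.factorial : Int) * (((j : Int) + 1) * s) := by
    rw [hs]; push_cast [Nat.factorial_succ]; ring
  have h1 : F / (j.factorial : Int) = ((j : Int) + 1) * s := by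
    rw [hF, Int.mul_ediv_cancel_left _ hj]
  have h2 : F / (((j + 1).factorial : Int)) = s := by
    rw [hs, Int.mul_ediv_cancel_left _ (by exact_mod_cast (j + 1).factorial_ne_zero)]
  rw [h1, h2, PySem.Int.floordiv_eq_ediv_of_pos (by positivity),
    Int.mul_ediv_cancel_left _ (by positivity)]

theorem pvBinom_succ (n : Int) (k : Nat) :
    PySem.Int.floordiv (pvBinom n k * (n - k)) ((k : Int) + 1) = pvBinom n (k + 1) := by
  obtain ⟨q, hq⟩ := pvFact_dvd_fall n k
  have hj : (k.factorial : Int) ≠ 0 := by exact_mod_cast k.factorial_ne_zero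
  have h1 : pvBinom n k * (n - k) = pvFall n (k + 1) / (k.factorial : Int) := by
    rw [pvBinom, hq, Int.mul_ediv_cancel_left _ hj, pvFall_succ, hq,
      mul_assoc, Int.mul_ediv_cancel_left _ hj]
  rw [h1, pv_div_step _ _ (pvFact_dvd_fall n (k + 1))]
  rfl

-- A's first loop computes the falling factorial
theorem pvA_prod (n : Int) (k : Nat) :
    (PySem.List.pyRange 0 (k : Int) 1).foldl (fun a i => a * (n - i)) 1 = pvFall n k := by
  induction k with
  | zero => simp [pvFall]
  | succ k ih =>
    rw [show (((k + 1 : Nat) : Int)) = (k : Int) + 1 by push_cast; ring,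
      PySem.List.pyRange_one_succ_right (by positivity), List.foldl_append, ih]
    simp [pvFall_succ]

-- A's second loop divides it down to the binomial coefficient
theorem pvA_div (n : Int) (K : Nat) :
    ∀ k : Nat, k ≤ K →
      (PySem.List.pyRange 0 (k : Int) 1).foldl (fun a i => PySem.Int.floordiv a (i + 1))
        (pvFall n K) = pvFall n K / (k.factorial : Int) := by
  intro k hk
  induction k with
  | zero => simp
  | succ k ih =>
    rw [show (((k + 1 : Nat) : Int)) = (k : Int) + 1 by push_cast; ring,
      PySem.List.pyRange_one_succ_right (by positivity), List.foldl_append,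
      ih (Nat.le_of_succ_le hk)]
    simp only [List.foldl_cons, List.foldl_nil]
    exact pv_div_step _ _ ((Int.natCast_dvd_natCast.mpr
      (Nat.factorial_dvd_factorial hk)).trans (pvFact_dvd_fall n K))

theorem pvC_eq (n : Int) (k : Nat) : pvC n k = pvBinom n k := by
  rw [pvC, pvA_prod, pvA_div n k k (le_refl k)]; rfl

theorem pvB_fold (n : Int) (m : Nat) :
    (PySem.List.pyRange 1 ((m : Int) + 1) 1).foldl
      (fun (st : Int × Int) k =>
        let b := PySem.Int.floordiv (st.2 * (n - k + 1)) k
        (if 5 ≤ k then st.1 + b else st.1, b)) (0, 1)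
    = (∑ k ∈ Finset.Icc 5 m, pvBinom n k, pvBinom n m) := by
  induction m with
  | zero =>
    simp [pvBinom, pvFall]
  | succ m ih =>
    rw [show (((m + 1 : Nat) : Int) + 1) = ((m : Int) + 1) + 1 by push_cast; ring,
      PySem.List.pyRange_one_succ_right (by omega), List.foldl_append, ih]
    simp only [List.foldl_cons, List.foldl_nil]
    have hb : PySem.Int.floordiv (pvBinom n m * (n - ((m : Int) + 1) + 1)) ((m : Int) + 1)
        = pvBinom n (m + 1) := by
      rw [show (n - ((m : Int) + 1) + 1) = n - m by ring, pvBinom_succ]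
    by_cases h5 : 5 ≤ m + 1
    · rw [if_pos (by exact_mod_cast Nat.cast_le.mpr h5), hb,
        Finset.sum_Icc_succ_top h5]
    · rw [if_neg (by omega), hb,
        show Finset.Icc 5 (m + 1) = Finset.Icc 5 m by
          rw [Finset.Icc_eq_empty (by omega), Finset.Icc_eq_empty (by omega)]]

theorem pvB_eq (n : Int) :
    count_group_composition_variants_alt n = pvBinom n 5 + pvBinom n 6 + pvBinom n 7 := by
  rw [count_group_composition_variants_alt,
    show (8 : Int) = ((7 : Nat) : Int) + 1 by norm_num, pvB_fold]
  rw [show Finset.Icc (5 : Nat) 7 = {5, 6, 7} from by decide]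
  simp [Finset.sum_insert, Finset.mem_insert]
  ring

-- ===== VERDICT (by name: the statement is the Claim_ definition above) =====
theorem count_group_composition_variants_spec : Claim_equal_count_group_composition_variants := by
  intro n _
  show count_group_composition_variants n = count_group_composition_variants_alt n
  rw [count_group_composition_variants, pvB_eq,
    show (5 : Int) = ((5 : Nat) : Int) by norm_num,
    show (6 : Int) = ((6 : Nat) : Int) by norm_num,
    show (7 : Int) = ((7 : Nat) : Int) by norm_num,
    pvC_eq, pvC_eq, pvC_eq]
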